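-- pv_equiv track=rewrite | github.com/emmartin-design/pptx-importer | excelreader2.py | longest_val
-- ===== SOURCE A (Python) =====
-- def longest_val(lst):
--     longest, shortest = lst[0], lst[0]
--     for val in lst:
--         if len(val) > len(longest):
--             longest = val
--         elif len(val) < len(shortest):
--             shortest = val
--     return longest, shortest
-- ===== SOURCE B (Python) =====
-- def longest_val(lst):
--     by_len = sorted(lst, key=len)
--     return sorted(lst, key=len, reverse=True)[0], by_len[0]
-- ===== Notes on version B (the rewrite author's own statement) =====
-- stated objective: alternative
-- what changed: A's fused single linear scan tracking both extremes is replaced by two stable sorts keyed on len (ascending and descending) whose heads are the first-occurring shortest and longest elements; stability reproduces A's strict-comparison first-occurrence tie-breaking.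
import Mathlib
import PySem

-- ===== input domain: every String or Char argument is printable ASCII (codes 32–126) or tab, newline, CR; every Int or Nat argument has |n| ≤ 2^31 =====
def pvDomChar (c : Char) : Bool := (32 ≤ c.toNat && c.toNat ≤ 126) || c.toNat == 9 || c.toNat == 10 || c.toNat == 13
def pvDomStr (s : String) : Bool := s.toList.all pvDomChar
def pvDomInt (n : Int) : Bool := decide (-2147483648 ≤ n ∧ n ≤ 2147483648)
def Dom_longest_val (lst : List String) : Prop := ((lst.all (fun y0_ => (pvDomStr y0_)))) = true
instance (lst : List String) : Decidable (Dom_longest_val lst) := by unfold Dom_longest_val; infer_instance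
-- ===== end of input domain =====

-- B replaces A's fused single scan by two stable sorts keyed on len and takes their heads
-- (stability gives A's first-occurrence tie-breaking); alternative algorithm, not faster.

-- ===== PORT A =====
def longest_val (lst : List String) : String × String :=
  match PySem.List.pyGet? lst 0 with
  | none => ("", "")   -- IndexError on empty list; excluded by Pre_
  | some h =>
    lst.foldl (fun ls v =>
      if PySem.Str.len v > PySem.Str.len ls.1 then (v, ls.2)
      else if PySem.Str.len v < PySem.Str.len ls.2 then (ls.1, v)
      else ls) (h, h)

-- ===== PORT B =====
def longest_val_alt (lst : List String) : String × String :=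
  let by_len := PySem.List.sorted lst (fun s => PySem.Str.len s) false
  match PySem.List.pyGet? (PySem.List.sorted lst (fun s => PySem.Str.len s) true) 0,
        PySem.List.pyGet? by_len 0 with
  | some M, some m => (M, m)
  | _, _ => ("", "")   -- IndexError on empty list; excluded by Pre_

-- ===== PRECONDITION & SPEC =====
-- Pre_ excludes only the empty list, where both A and B raise IndexError.
def Pre_longest_val (lst : List String) : Prop := lst ≠ []
instance (lst : List String) : Decidable (Pre_longest_val lst) := by unfold Pre_longest_val; infer_instance
def pvWitness_longest_val : List String := (["a", "bb", ""])
def Spec_longest_val (lst : List String) (out : String × String) : Prop := out = longest_val_alt lst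
instance (lst : List String) (out : String × String) : Decidable (Spec_longest_val lst out) := by unfold Spec_longest_val; infer_instance

-- ===== CLAIM (what is proved, stated in full; the proofs are below) =====
def Claim_equal_longest_val : Prop := ∀ (lst : List String), Dom_longest_val lst → Pre_longest_val lst → Spec_longest_val lst (longest_val lst)

-- ===== LEMMAS AND PROOFS =====

-- A's loop body, and the running first-occurrence max / min steps
def pvStepA (ls : String × String) (v : String) : String × String :=
  if PySem.Str.len v > PySem.Str.len ls.1 then (v, ls.2)
  else if PySem.Str.len v < PySem.Str.len ls.2 then (ls.1, v)
  else ls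
def pvMaxStep (m v : String) : String := if PySem.Str.len m < PySem.Str.len v then v else m
def pvMinStep (m v : String) : String := if PySem.Str.len v < PySem.Str.len m then v else m

-- head of repeated stable insertion: the running "first element beating all so far"
theorem pvHeadFoldlInsertBy {α : Type} (before : α → α → Bool) (xs : List α) :
    ∀ (m : α) (t : List α),
      (xs.foldl (fun acc x => PySem.List.insertBy before x acc) (m :: t)).head? =
        some (xs.foldl (fun m x => if before x m then x else m) m) := by
  induction xs with
  | nil => intro m t; rfl
  | cons x xs ih =>
    intro m t
    simp only [List.foldl_cons, PySem.List.insertBy]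
    by_cases h : before x m
    · rw [if_pos h, if_pos h]; exact ih x (m :: t)
    · rw [if_neg h, if_neg h]; exact ih m _

-- head of the ascending length-sort = A's running min
theorem pvHeadSortedAsc (h : String) (t : List String) :
    (PySem.List.sorted (h :: t) (fun s => PySem.Str.len s) false).head? =
      some (t.foldl pvMinStep h) := by
  rw [PySem.List.sorted_eq_foldl_insertBy]
  simp only [List.foldl_cons, PySem.List.insertBy]
  rw [pvHeadFoldlInsertBy (fun a b : String => decide (PySem.Str.len a < PySem.Str.len b)) t h []]
  congr 1
  have hf : (fun (m x : String) => if decide (PySem.Str.len x < PySem.Str.len m) = true then x else m) = pvMinStep := by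
    funext m v; simp [pvMinStep]
  rw [hf]

-- head of the descending length-sort = A's running max
theorem pvHeadSortedDesc (h : String) (t : List String) :
    (PySem.List.sorted (h :: t) (fun s => PySem.Str.len s) true).head? =
      some (t.foldl pvMaxStep h) := by
  rw [PySem.List.sorted_rev_eq_foldl_insertBy]
  simp only [List.foldl_cons, PySem.List.insertBy]
  rw [pvHeadFoldlInsertBy (fun a b : String => decide (PySem.Str.len b < PySem.Str.len a)) t h []]
  congr 1
  have hf : (fun (m x : String) => if decide (PySem.Str.len m < PySem.Str.len x) = true then x else m) = pvMaxStep := by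
    funext m v; simp [pvMaxStep]
  rw [hf]

-- fused loop = the two independent running scans, under the invariant len s ≤ len l
theorem pvFused (t : List String) : ∀ (l s : String),
    PySem.Str.len s ≤ PySem.Str.len l →
    t.foldl pvStepA (l, s) = (t.foldl pvMaxStep l, t.foldl pvMinStep s) := by
  induction t with
  | nil => intro l s _; rfl
  | cons x t ih =>
    intro l s hls
    simp only [List.foldl_cons, pvStepA, pvMaxStep, pvMinStep]
    by_cases h1 : PySem.Str.len l < PySem.Str.len x
    · rw [if_pos h1, if_pos h1, if_neg (by omega)]
      exact ih x s (by omega)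
    · rw [if_neg h1, if_neg h1]
      by_cases h2 : PySem.Str.len x < PySem.Str.len s
      · rw [if_pos h2, if_pos h2]; exact ih l x (by omega)
      · rw [if_neg h2, if_neg h2]; exact ih l s hls

theorem pvGet0_head? (xs : List String) : PySem.List.pyGet? xs 0 = xs.head? := by
  cases xs <;> simp [PySem.List.pyGet?, PySem.List.pyIdx?]

-- ===== VERDICT (by name: the statement is the Claim_ definition above) =====
theorem longest_val_spec : Claim_equal_longest_val := by
  intro lst _ hpre
  unfold Spec_longest_val
  obtain ⟨h, t, rfl⟩ : ∃ x xs, lst = x :: xs := by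
    cases lst with | nil => exact absurd rfl hpre | cons x xs => exact ⟨x, xs, rfl⟩
  unfold longest_val longest_val_alt
  simp only [pvGet0_head?, pvHeadSortedAsc, pvHeadSortedDesc]
  show List.foldl pvStepA (h, h) (h :: t) = _
  simp only [List.foldl_cons]
  have hstep : pvStepA (h, h) h = (h, h) := by simp [pvStepA]
  rw [hstep, pvFused t h h le_rfl]
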